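-- pv_equiv track=rewrite | github.com/davidjurado/bbva_speech_analytics | modelos/server/flask/text_analysis_sytem.py | get_verb
-- ===== SOURCE A (Python) =====
-- def get_verb(input_text):
--     line3 = "vacío"
--
--     line = input_text.lower()
--     ini = [line.find(a) for a in ['mira','mire','el motivo','quiero','gustaria','quisiera','llamo para','necesito','llamo porque','estuve','ayudar?','lo que pasa']]
--     ini_words = [a for a in ini if a!=-1]
--     if len(ini_words) != 0:
--         line2 = line[min([a for a in ini if a!=-1]):]
--         line3 = ''.join(line2.split('.')[0:3])
--     else:
--         line3 = ''.join(line.split('?')[1:3])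
--
--     if line3 != "":
--         return line3
--     else:
--         return "vacío"
-- ===== SOURCE B (Python) =====
-- KEYWORDS = ('mira', 'mire', 'el motivo', 'quiero', 'gustaria', 'quisiera',
--             'llamo para', 'necesito', 'llamo porque', 'estuve', 'ayudar?',
--             'lo que pasa')
--
--
-- def get_verb(input_text):
--     line = input_text.lower()
--     pos = None
--     for i in range(len(line)):
--         if any(line.startswith(k, i) for k in KEYWORDS):
--             pos = i
--             break
--     if pos is not None:
--         line3 = ''.join(line[pos:].split('.')[:3])
--     else:
--         line3 = ''.join(line.split('?')[1:3])
--     return line3 if line3 != '' else 'vacío'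
-- ===== Notes on version B (the rewrite author's own statement) =====
-- stated objective: alternative
-- what changed: Replaces the 12 independent str.find calls plus a filter-and-min pass with a single left-to-right scan that stops at the first position where any keyword starts (leftmost-match search), the rest unchanged.
import Mathlib
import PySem

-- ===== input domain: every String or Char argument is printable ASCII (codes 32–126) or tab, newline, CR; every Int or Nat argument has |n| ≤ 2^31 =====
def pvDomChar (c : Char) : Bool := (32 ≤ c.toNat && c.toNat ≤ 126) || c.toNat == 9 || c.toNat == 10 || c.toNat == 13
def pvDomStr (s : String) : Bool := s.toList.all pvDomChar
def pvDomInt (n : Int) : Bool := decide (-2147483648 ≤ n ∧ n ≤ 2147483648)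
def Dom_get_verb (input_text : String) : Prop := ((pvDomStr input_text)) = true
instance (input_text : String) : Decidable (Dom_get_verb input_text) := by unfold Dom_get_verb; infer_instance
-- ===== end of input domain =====

-- B replaces the twelve find calls + min over non-(-1) positions with one left-to-right
-- scan stopping at the first position where any keyword starts; alternative decomposition, not claimed faster.

-- ===== PORT A =====
def pvKwA : List String :=
  ["mira","mire","el motivo","quiero","gustaria","quisiera","llamo para","necesito","llamo porque","estuve","ayudar?","lo que pasa"]

def get_verb (input_text : String) : String :=
  let line := PySem.Str.lower input_text
  let ini := pvKwA.map (fun a => PySem.Str.find line a)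
  let ini_words := ini.filter (fun a => a != -1)
  let line3 :=
    if ini_words.length ≠ 0 then
      -- min(...) on a guarded-nonempty list; getD 0 is unreachable
      let line2 := PySem.Str.slice line (some ((PySem.List.min? (ini.filter (fun a => a != -1)) (fun x => x)).getD 0)) none
      -- line2.split('.') : sep ≠ "" so split? is some
      PySem.Str.join "" (PySem.List.slice ((PySem.Str.split? line2 ".").getD []) (some 0) (some 3))
    else
      PySem.Str.join "" (PySem.List.slice ((PySem.Str.split? line "?").getD []) (some 1) (some 3))
  if line3 ≠ "" then line3 else "vacío"

-- ===== PORT B =====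
def pvKwB : List (List Char) :=
  ["mira".toList,"mire".toList,"el motivo".toList,"quiero".toList,"gustaria".toList,"quisiera".toList,
   "llamo para".toList,"necesito".toList,"llamo porque".toList,"estuve".toList,"ayudar?".toList,"lo que pasa".toList]

-- the for-loop with break: first index i with some keyword starting at i (line.startswith(k, i))
def pvScan (ks : List (List Char)) : Nat → List Char → Option Nat
  | _, [] => none
  | i, c :: rest => if ks.any (fun k => k.isPrefixOf (c :: rest)) then some i else pvScan ks (i+1) rest

def get_verb_alt (input_text : String) : String :=
  let line := PySem.Str.lower input_text
  let line3 :=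
    match pvScan pvKwB 0 line.toList with
    | some pos =>
      PySem.Str.join "" (PySem.List.slice ((PySem.Str.split? (PySem.Str.slice line (some (pos : Int)) none) ".").getD []) (some 0) (some 3))
    | none =>
      PySem.Str.join "" (PySem.List.slice ((PySem.Str.split? line "?").getD []) (some 1) (some 3))
  if line3 ≠ "" then line3 else "vacío"

-- ===== PRECONDITION & SPEC =====
def Spec_get_verb (input_text : String) (out : String) : Prop := out = get_verb_alt input_text
instance (input_text : String) (out : String) : Decidable (Spec_get_verb input_text out) := by unfold Spec_get_verb; infer_instance

-- ===== CLAIM (what is proved, stated in full; the proofs are below) =====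
def Claim_equal_get_verb : Prop := ∀ (input_text : String), Dom_get_verb input_text → Spec_get_verb input_text (get_verb input_text)

-- ===== LEMMAS AND PROOFS =====

theorem pvScan_none {ks : List (List Char)} (hne : ∀ k ∈ ks, k ≠ []) :
    ∀ (cs : List Char) (i : Nat), pvScan ks i cs = none →
      ∀ j, ∀ k ∈ ks, ¬ k <+: cs.drop j := by
  intro cs
  induction cs with
  | nil =>
      intro i _ j k hk hpre
      simp at hpre
      exact hne k hk hpre
  | cons c rest ih =>
      intro i h j k hk hpre
      unfold pvScan at h
      split at h
      · simp at h
      · rename_i hcond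
        cases j with
        | zero =>
            simp only [List.drop_zero] at hpre
            exact hcond (List.any_eq_true.mpr ⟨k, hk, List.isPrefixOf_iff_prefix.mpr hpre⟩)
        | succ j' =>
            exact ih (i+1) h j' k hk (by simpa using hpre)

theorem pvScan_some {ks : List (List Char)} :
    ∀ (cs : List Char) (i p : Nat), pvScan ks i cs = some p →
      i ≤ p ∧ (∃ k ∈ ks, k <+: cs.drop (p - i)) ∧ (∀ j < p - i, ∀ k ∈ ks, ¬ k <+: cs.drop j) := by
  intro cs
  induction cs with
  | nil => intro i p h; simp [pvScan] at h
  | cons c rest ih =>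
      intro i p h
      unfold pvScan at h
      split at h
      · rename_i hcond
        cases h
        refine ⟨le_refl _, ?_, ?_⟩
        · obtain ⟨k, hk, hp⟩ := List.any_eq_true.mp hcond
          exact ⟨k, hk, by simpa using List.isPrefixOf_iff_prefix.mp hp⟩
        · intro j hj; omega
      · rename_i hcond
        obtain ⟨h1, ⟨k0, hk0, hp0⟩, hmin⟩ := ih (i+1) p h
        refine ⟨by omega, ⟨k0, hk0, ?_⟩, ?_⟩
        · have : (c :: rest).drop (p - i) = rest.drop (p - (i+1)) := by
            have : p - i = (p - (i+1)) + 1 := by omega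
            simp [this]
          rw [this]; exact hp0
        · intro j hj k hk
          cases j with
          | zero =>
              intro hpre
              simp only [List.drop_zero] at hpre
              exact hcond (List.any_eq_true.mpr ⟨k, hk, List.isPrefixOf_iff_prefix.mpr hpre⟩)
          | succ j' =>
              have := hmin j' (by omega) k hk
              simpa using this

theorem pv_not_infix {cs k : List Char} (h : ∀ j, ¬ k <+: cs.drop j) : ¬ k <:+: cs := by
  intro hinf
  have := PySem.Chars.exists_prefix_drop_iff_isIn k cs
  have hIn : PySem.Chars.isIn k cs = true := (PySem.Chars.isIn_iff_infix k cs).mpr hinf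
  obtain ⟨j, hj⟩ := this.mpr hIn
  exact h j hj

-- none case: every find is -1, so the filtered list is empty
theorem pv_filter_nil {cs : List Char} (h : pvScan pvKwB 0 cs = none) :
    (pvKwA.map (fun a => PySem.Chars.find cs a.toList)).filter (fun a => a != -1) = [] := by
  have hall := pvScan_none (ks := pvKwB) (by decide) cs 0 h
  rw [List.filter_eq_nil_iff]
  intro a ha
  obtain ⟨kstr, hkm, rfl⟩ := List.mem_map.mp ha
  have hkB : kstr.toList ∈ pvKwB := by
    fin_cases hkm <;> simp [pvKwB]
  have : ¬ kstr.toList <:+: cs := pv_not_infix (fun j => hall j _ hkB)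
  simp [(PySem.Chars.find_eq_neg_one_iff cs kstr.toList).mpr this]

-- some case: the min of the filtered finds is exactly the scan position
theorem pv_min_eq {cs : List Char} {p : Nat} (h : pvScan pvKwB 0 cs = some p) :
    PySem.List.min? ((pvKwA.map (fun a => PySem.Chars.find cs a.toList)).filter (fun a => a != -1)) (fun x => x) = some (p : Int) := by
  obtain ⟨-, ⟨k0, hk0, hp0⟩, hmin⟩ := pvScan_some (ks := pvKwB) cs 0 p h
  simp only [Nat.sub_zero] at hp0 hmin
  -- every keyword's successful find position is ≥ p
  have hge : ∀ a ∈ (pvKwA.map (fun a => PySem.Chars.find cs a.toList)).filter (fun a => a != -1), (p : Int) ≤ a := by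
    intro a ha
    rw [List.mem_filter] at ha
    obtain ⟨ham, hane⟩ := ha
    obtain ⟨kstr, hkm, rfl⟩ := List.mem_map.mp ham
    have hne1 : PySem.Chars.find cs kstr.toList ≠ -1 := by simpa using hane
    have hnn : 0 ≤ PySem.Chars.find cs kstr.toList := by
      rcases (PySem.Chars.neg_one_le_find cs kstr.toList).lt_or_eq with h' | h'
      · omega
      · exact absurd h'.symm hne1
    obtain ⟨hpre, -⟩ := PySem.Chars.find_spec (s := cs) (sub := kstr.toList) hnn
    have hkB : kstr.toList ∈ pvKwB := by fin_cases hkm <;> simp [pvKwB]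
    by_contra hlt
    push Not at hlt
    have hlt' : (PySem.Chars.find cs kstr.toList).toNat < p := by omega
    exact hmin _ hlt' _ hkB hpre
  -- k0's find is exactly p
  have hk0A : ∃ kstr ∈ pvKwA, kstr.toList = k0 := by
    fin_cases hk0 <;> exact ⟨_, by simp [pvKwA], rfl⟩
  obtain ⟨kstr0, hk0m, rfl⟩ := hk0A
  have hinf : kstr0.toList <:+: cs := by
    obtain ⟨t, ht⟩ := hp0
    exact ⟨cs.take p, t, by rw [List.append_assoc, ht, List.take_append_drop]⟩
  have hnn : 0 ≤ PySem.Chars.find cs kstr0.toList := (PySem.Chars.find_nonneg_iff cs kstr0.toList).mpr hinf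
  obtain ⟨hpre0, hmin0⟩ := PySem.Chars.find_spec (s := cs) (sub := kstr0.toList) hnn
  have hmemF : PySem.Chars.find cs kstr0.toList ∈ (pvKwA.map (fun a => PySem.Chars.find cs a.toList)).filter (fun a => a != -1) := by
    rw [List.mem_filter]
    refine ⟨List.mem_map.mpr ⟨kstr0, hk0m, rfl⟩, by simp; omega⟩
  have hle : PySem.Chars.find cs kstr0.toList ≤ (p : Int) := by
    by_contra hgt
    push Not at hgt
    exact hmin0 p (by omega) hp0
  have heq : PySem.Chars.find cs kstr0.toList = (p : Int) := le_antisymm hle (hge _ hmemF)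
  -- min? of a nonempty list whose least element is p
  cases hm : PySem.List.min? ((pvKwA.map (fun a => PySem.Chars.find cs a.toList)).filter (fun a => a != -1)) (fun x => x) with
  | none =>
      rw [PySem.List.min?_eq_none_iff _ _] at hm
      rw [hm] at hmemF
      simp at hmemF
  | some m =>
      have hmm := PySem.List.min?_mem (key := fun x => x) hm
      have hmin' := PySem.List.min?_isMin (key := fun x => x) hm
      have h1 : (p : Int) ≤ m := hge _ hmm
      have h2 : m ≤ (p : Int) := by have := hmin' _ hmemF; rw [heq] at this; exact this
      rw [le_antisymm h2 h1]

-- ===== VERDICT (by name: the statement is the Claim_ definition above) =====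
theorem get_verb_spec : Claim_equal_get_verb := by
  intro input_text _
  unfold Spec_get_verb get_verb get_verb_alt
  simp only [PySem.Str.find_eq, PySem.Str.toList_lower]
  cases hscan : pvScan pvKwB 0 (PySem.Chars.lower input_text.toList) with
  | none =>
      have hnil := pv_filter_nil hscan
      simp only [hnil]
      simp
  | some p =>
      have hmin := pv_min_eq hscan
      have hne : (pvKwA.map (fun a => PySem.Chars.find (PySem.Chars.lower input_text.toList) a.toList)).filter (fun a => a != -1) ≠ [] := by
        intro hn
        rw [hn, PySem.List.min?_eq_none_iff _ _ |>.mpr rfl] at hmin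
        simp at hmin
      have hlen : ((pvKwA.map (fun a => PySem.Chars.find (PySem.Chars.lower input_text.toList) a.toList)).filter (fun a => a != -1)).length ≠ 0 := by
        simpa [List.length_eq_zero_iff] using hne
      simp only [hmin, Option.getD_some, if_pos hlen]
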